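-- pv_equiv track=rewrite | github.com/wytyl13/agent_ | agent/tool/retrieval.py | line_based_chunking
-- ===== SOURCE A (Python) =====
-- def line_based_chunking(text):
--     """按行分块并保留上下文"""
--     lines = text.split('\n')
--     current_date = None
--     chunks = []
--
--     for line in lines:
--         line = line.strip()
--         if not line:
--             continue
--
--         # 提取日期
--         if line.startswith('##'):
--             current_date = line.replace('##', '').strip()
--             continue
--
--         # 为每行添加日期上下文
--         if current_date and line.startswith(('1.', '2.', '3.', '4.', '5.')):
--             enhanced_line = f"{current_date} {line}"
--             chunks.append(enhanced_line)
--         elif line.startswith(('**', '1.', '2.', '3.', '4.', '5.')):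
--             # 如果没有日期上下文，直接添加
--             chunks.append(line)
--
--     return chunks
-- ===== SOURCE B (Python) =====
-- def line_based_chunking(text):
--     """Two-pass: first partition the lines into dated sections, then render each section."""
--     # pass 1: sections = list of (date_or_None, [stripped content lines])
--     sections = []
--     date = None
--     content = []
--     for raw in text.split('\n'):
--         line = raw.strip()
--         if not line:
--             continue
--         if line.startswith('##'):
--             sections.append((date, content))
--             date = line.replace('##', '').strip()
--             content = []
--         else:
--             content.append(line)
--     sections.append((date, content))
--     # pass 2: render
--     chunks = []
--     for date, lines in sections:
--         for line in lines:
--             if date and line.startswith(('1.', '2.', '3.', '4.', '5.')):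
--                 chunks.append(f"{date} {line}")
--             elif line.startswith(('**', '1.', '2.', '3.', '4.', '5.')):
--                 chunks.append(line)
--     return chunks
-- ===== Notes on version B (the rewrite author's own statement) =====
-- stated objective: alternative
-- what changed: Replaces A's single stateful loop by a two-pass decomposition: pass 1 partitions the lines into (date, content-lines) sections, pass 2 renders each section's lines with the date rules.
import Mathlib
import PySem

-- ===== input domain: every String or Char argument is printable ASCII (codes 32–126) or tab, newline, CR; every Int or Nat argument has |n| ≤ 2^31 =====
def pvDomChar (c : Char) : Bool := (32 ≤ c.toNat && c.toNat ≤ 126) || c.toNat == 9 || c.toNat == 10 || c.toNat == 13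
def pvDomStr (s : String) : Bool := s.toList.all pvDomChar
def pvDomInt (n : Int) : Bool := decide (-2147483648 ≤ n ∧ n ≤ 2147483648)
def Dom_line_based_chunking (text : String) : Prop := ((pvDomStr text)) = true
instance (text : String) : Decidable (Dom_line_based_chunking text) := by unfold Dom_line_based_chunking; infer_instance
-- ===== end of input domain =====

-- shared: text.split('\n') (sep is the nonempty literal "\n", so split? always returns some)
def pvLines (text : String) : List String := (PySem.Str.split? text "\n").getD []

-- B is a two-pass decomposition of A's single stateful loop (same cost); return values proved equal on all inputs.

-- ===== PORT A =====
-- line.startswith(('1.', '2.', '3.', '4.', '5.'))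
def pvStartsNum (line : String) : Bool :=
  PySem.Str.startswith line "1." || PySem.Str.startswith line "2." ||
  PySem.Str.startswith line "3." || PySem.Str.startswith line "4." ||
  PySem.Str.startswith line "5."

-- Python truthiness of current_date (None or a possibly empty string)
def pvTruthy : Option String → Bool
  | none => false
  | some s => !(s == "")

def pvStepA (st : Option String × List String) (raw : String) : Option String × List String :=
  let line := PySem.Str.strip raw
  if line == "" then st
  else if PySem.Str.startswith line "##" then
    (some (PySem.Str.strip (PySem.Str.replace line "##" "")), st.2)
  else if pvTruthy st.1 && pvStartsNum line then
    (st.1, st.2 ++ [(st.1.getD "") ++ " " ++ line])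
  else if PySem.Str.startswith line "**" || pvStartsNum line then
    (st.1, st.2 ++ [line])
  else st

def line_based_chunking (text : String) : List String :=
  ((pvLines text).foldl pvStepA (none, [])).2

-- ===== PORT B =====
-- pass 1 step: accumulate (date, content, finished sections)
def pvStepB1 (st : Option String × List String × List (Option String × List String))
    (raw : String) : Option String × List String × List (Option String × List String) :=
  let line := PySem.Str.strip raw
  if line == "" then st
  else if PySem.Str.startswith line "##" then
    (some (PySem.Str.strip (PySem.Str.replace line "##" "")), [], st.2.2 ++ [(st.1, st.2.1)])
  else (st.1, st.2.1 ++ [line], st.2.2)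

-- pass 2: per-line rendering under a section date
def pvEmit (date : Option String) (acc : List String) (line : String) : List String :=
  if pvTruthy date && pvStartsNum line then acc ++ [(date.getD "") ++ " " ++ line]
  else if PySem.Str.startswith line "**" || pvStartsNum line then acc ++ [line]
  else acc

-- sections.append((date, content)) after the first pass
def pvFinish (st : Option String × List String × List (Option String × List String)) :
    List (Option String × List String) := st.2.2 ++ [(st.1, st.2.1)]

def line_based_chunking_alt (text : String) : List String :=
  (pvFinish ((pvLines text).foldl pvStepB1 (none, [], []))).foldl
    (fun chunks sec => sec.2.foldl (pvEmit sec.1) chunks) []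

-- ===== PRECONDITION & SPEC =====
def Spec_line_based_chunking (text : String) (out : List String) : Prop := out = line_based_chunking_alt text
instance (text : String) (out : List String) : Decidable (Spec_line_based_chunking text out) := by unfold Spec_line_based_chunking; infer_instance

-- ===== CLAIM (what is proved, stated in full; the proofs are below) =====
def Claim_equal_line_based_chunking : Prop := ∀ (text : String), Dom_line_based_chunking text → Spec_line_based_chunking text (line_based_chunking text)

-- ===== LEMMAS AND PROOFS =====

-- single-line emission as a list (what A appends for one content line under date d)
def pvEmit1 (d : Option String) (line : String) : List String :=
  if pvTruthy d && pvStartsNum line then [(d.getD "") ++ " " ++ line]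
  else if PySem.Str.startswith line "**" || pvStartsNum line then [line]
  else []

-- the common mathematical spine: chunks produced from the remaining lines given the current date
def pvSpine : List String → Option String → List String
  | [], _ => []
  | raw :: ls, d =>
    let line := PySem.Str.strip raw
    if line == "" then pvSpine ls d
    else if PySem.Str.startswith line "##" then
      pvSpine ls (some (PySem.Str.strip (PySem.Str.replace line "##" "")))
    else pvEmit1 d line ++ pvSpine ls d

theorem pvEmit_eq (d : Option String) (acc : List String) (line : String) :
    pvEmit d acc line = acc ++ pvEmit1 d line := by
  unfold pvEmit pvEmit1; split_ifs <;> simp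

-- A's loop appends exactly the spine
theorem pvA_spine (lines : List String) :
    ∀ (d : Option String) (ch : List String),
      (lines.foldl pvStepA (d, ch)).2 = ch ++ pvSpine lines d := by
  induction lines with
  | nil => intro d ch; simp [pvSpine]
  | cons raw ls ih =>
    intro d ch
    simp only [List.foldl_cons, pvStepA, pvSpine, pvEmit1]
    split_ifs <;> simp [ih]

-- flattened rendering of a list of sections
def pvRenderAll (secs : List (Option String × List String)) : List String :=
  secs.flatMap (fun sec => sec.2.flatMap (pvEmit1 sec.1))

-- B's pass-2 fold equals the flattened rendering
theorem pvRender_eq (secs : List (Option String × List String)) (acc : List String) :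
    secs.foldl (fun chunks sec => sec.2.foldl (pvEmit sec.1) chunks) acc
      = acc ++ pvRenderAll secs := by
  induction secs generalizing acc with
  | nil => simp [pvRenderAll]
  | cons s ss ih =>
    simp only [List.foldl_cons, ih, pvRenderAll, List.flatMap_cons]
    have : s.2.foldl (pvEmit s.1) acc = acc ++ s.2.flatMap (pvEmit1 s.1) := by
      simp only [funext (fun a => funext (pvEmit_eq s.1 a)),
        PySem.List.foldl_append_eq_flatMap]
    rw [this, List.append_assoc]

-- B's pass 1, once flattened, also produces the spine
theorem pvB1_spine (lines : List String) :
    ∀ (d : Option String) (content : List String) (secs : List (Option String × List String)),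
      pvRenderAll (pvFinish (lines.foldl pvStepB1 (d, content, secs)))
      = pvRenderAll secs ++ content.flatMap (pvEmit1 d) ++ pvSpine lines d := by
  induction lines with
  | nil => intro d content secs; simp [pvRenderAll, pvFinish, pvSpine]
  | cons raw ls ih =>
    intro d content secs
    simp only [List.foldl_cons, pvStepB1, pvSpine]
    split_ifs with h1 h2
    · exact ih d content secs
    · rw [ih]; simp [pvRenderAll]
    · rw [ih]; simp [pvRenderAll, List.append_assoc]

-- ===== VERDICT (by name: the statement is the Claim_ definition above) =====
theorem line_based_chunking_spec : Claim_equal_line_based_chunking := by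
  intro text _
  unfold Spec_line_based_chunking line_based_chunking line_based_chunking_alt
  rw [pvA_spine, pvRender_eq, pvB1_spine]
  simp [pvRenderAll]
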